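-- pv_equiv track=rewrite | github.com/dataforgoodfr/batch5_phenix_happymeal | off_mgt.py | rename_group
-- ===== SOURCE A (Python) =====
-- def rename_group(str_group2=None):
--     """
--     Rename OFF food group (pnns_group_2) to a standard name
--     Args:
--         str_group2 (str): OFF food group name
--     Returns:
--         conv_group (str): standard food group name
--     """
--     #convert_group1 = {'Beverage':['Beverages'],
--     #                  'Cereals':['Cereals and potatoes'],
--     #                  'Meal':['Composite foods'],
--     #                  'Fat':['Fat and sauces'],
--     #                  'Meat':['Fish Meat Eggs'],
--     #                  'Fruits and vegetables':['Fruits and vegetables','fruits-and-vegetables'],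
--     #                  'Dairy':['Milk and dairy products'],
--     #                  'Snack':['Salty snacks','Sugary snacks','sugary-snacks'],
--     #                  None:[None,'unknown','']}
--     convert_group2 = {'Beverage':['Alcoholic beverages','Artificially sweetened beverages',
--                                   'Fruit juices','Fruit nectars','Non-sugared beverages',
--                                   'Sweetened beverages'],
--                       'Cereals':['Bread','Breakfast cereals','Cereals','Legumes','Patatoes'],
--                       'Meal':['One-dish meals','Pizza pies and quiche','Sandwich'],
--                       'Fat':['Dressings and sauces','Fats'],
--                       'Meat':['Tripe dishes','Eggs','Fish and seafood','Meat','Processed meat','Nuts'],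
--                       'Fruit':['Fruits','fruits','Dried fruits'],
--                       'Vegetable':['Soups','Vegetables','vegetables'],
--                       'Dairy':['Cheese','Dairy desserts','Ice cream','Milk and yogurt'],
--                       'Snack':['Appetizers','Salty and fatty products','Biscuits and cakes',
--                                'Chocolate products','Sweets','pastries'],
--                       None:[None,'unknown','']}
--     conv_group = [key for (key, value) in convert_group2.items() if (str_group2 in value)]
--     conv_group = [None] if not conv_group else conv_group
--     return conv_group[0]
-- ===== SOURCE B (Python) =====
-- # Flat inverted lookup table: OFF subgroup name -> standard group name.
-- _INV = {'Alcoholic beverages': 'Beverage',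
--         'Artificially sweetened beverages': 'Beverage',
--         'Fruit juices': 'Beverage',
--         'Fruit nectars': 'Beverage',
--         'Non-sugared beverages': 'Beverage',
--         'Sweetened beverages': 'Beverage',
--         'Bread': 'Cereals',
--         'Breakfast cereals': 'Cereals',
--         'Cereals': 'Cereals',
--         'Legumes': 'Cereals',
--         'Patatoes': 'Cereals',
--         'One-dish meals': 'Meal',
--         'Pizza pies and quiche': 'Meal',
--         'Sandwich': 'Meal',
--         'Dressings and sauces': 'Fat',
--         'Fats': 'Fat',
--         'Tripe dishes': 'Meat',
--         'Eggs': 'Meat',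
--         'Fish and seafood': 'Meat',
--         'Meat': 'Meat',
--         'Processed meat': 'Meat',
--         'Nuts': 'Meat',
--         'Fruits': 'Fruit',
--         'fruits': 'Fruit',
--         'Dried fruits': 'Fruit',
--         'Soups': 'Vegetable',
--         'Vegetables': 'Vegetable',
--         'vegetables': 'Vegetable',
--         'Cheese': 'Dairy',
--         'Dairy desserts': 'Dairy',
--         'Ice cream': 'Dairy',
--         'Milk and yogurt': 'Dairy',
--         'Appetizers': 'Snack',
--         'Salty and fatty products': 'Snack',
--         'Biscuits and cakes': 'Snack',
--         'Chocolate products': 'Snack',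
--         'Sweets': 'Snack',
--         'pastries': 'Snack'}
--
--
-- def rename_group(str_group2=None):
--     """
--     Rename OFF food group (pnns_group_2) to a standard name
--     Args:
--         str_group2 (str): OFF food group name
--     Returns:
--         conv_group (str): standard food group name
--     """
--     if str_group2 is None or str_group2 == 'unknown' or str_group2 == '':
--         return None
--     return _INV.get(str_group2)
-- ===== Notes on version B (the rewrite author's own statement) =====
-- stated objective: idiomatic
-- what changed: B replaces A's per-call comprehension that scans every group's name list for membership with a flat precomputed name-to-group dictionary and a single direct lookup (after an explicit None/'unknown'/'' guard).
import Mathlib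
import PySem

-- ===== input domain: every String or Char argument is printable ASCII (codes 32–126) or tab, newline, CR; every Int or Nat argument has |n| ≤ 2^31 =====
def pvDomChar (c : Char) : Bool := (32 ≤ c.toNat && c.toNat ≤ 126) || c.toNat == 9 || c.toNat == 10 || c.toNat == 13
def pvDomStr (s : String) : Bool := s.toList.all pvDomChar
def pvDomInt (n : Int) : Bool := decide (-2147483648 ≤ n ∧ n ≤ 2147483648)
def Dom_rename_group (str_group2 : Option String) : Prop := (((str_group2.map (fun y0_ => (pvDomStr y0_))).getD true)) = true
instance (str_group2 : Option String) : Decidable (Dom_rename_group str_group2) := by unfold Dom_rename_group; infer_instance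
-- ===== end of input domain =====

-- B replaces A's per-call membership scan over every group's name list with a flat
-- precomputed name→group dictionary and one direct lookup (idiomatic).

-- ===== PORT A =====
-- the convert_group2 dict of A, as its (key, value-list) items in order
def convertGroup2 : List (Option String × List (Option String)) :=
  [(some "Beverage", [some "Alcoholic beverages", some "Artificially sweetened beverages", some "Fruit juices", some "Fruit nectars", some "Non-sugared beverages", some "Sweetened beverages"]),
   (some "Cereals", [some "Bread", some "Breakfast cereals", some "Cereals", some "Legumes", some "Patatoes"]),
   (some "Meal", [some "One-dish meals", some "Pizza pies and quiche", some "Sandwich"]),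
   (some "Fat", [some "Dressings and sauces", some "Fats"]),
   (some "Meat", [some "Tripe dishes", some "Eggs", some "Fish and seafood", some "Meat", some "Processed meat", some "Nuts"]),
   (some "Fruit", [some "Fruits", some "fruits", some "Dried fruits"]),
   (some "Vegetable", [some "Soups", some "Vegetables", some "vegetables"]),
   (some "Dairy", [some "Cheese", some "Dairy desserts", some "Ice cream", some "Milk and yogurt"]),
   (some "Snack", [some "Appetizers", some "Salty and fatty products", some "Biscuits and cakes", some "Chocolate products", some "Sweets", some "pastries"]),
   (none, [none, some "unknown", some ""])]

def rename_group (str_group2 : Option String) : Option String :=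
  let conv_group := (convertGroup2.filter (fun kv => str_group2 ∈ kv.2)).map Prod.fst
  let conv_group := if conv_group = [] then [none] else conv_group
  match conv_group with
  | [] => none            -- unreachable: conv_group is nonempty; Python indexes [0]
  | k :: _ => k

-- ===== PORT B =====
-- Source B's module-level flat dict literal _INV : subgroup name -> standard group name
def invTable : PySem.Dict String String :=
  PySem.Dict.mk
  [("Alcoholic beverages", "Beverage"),
   ("Artificially sweetened beverages", "Beverage"),
   ("Fruit juices", "Beverage"),
   ("Fruit nectars", "Beverage"),
   ("Non-sugared beverages", "Beverage"),
   ("Sweetened beverages", "Beverage"),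
   ("Bread", "Cereals"),
   ("Breakfast cereals", "Cereals"),
   ("Cereals", "Cereals"),
   ("Legumes", "Cereals"),
   ("Patatoes", "Cereals"),
   ("One-dish meals", "Meal"),
   ("Pizza pies and quiche", "Meal"),
   ("Sandwich", "Meal"),
   ("Dressings and sauces", "Fat"),
   ("Fats", "Fat"),
   ("Tripe dishes", "Meat"),
   ("Eggs", "Meat"),
   ("Fish and seafood", "Meat"),
   ("Meat", "Meat"),
   ("Processed meat", "Meat"),
   ("Nuts", "Meat"),
   ("Fruits", "Fruit"),
   ("fruits", "Fruit"),
   ("Dried fruits", "Fruit"),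
   ("Soups", "Vegetable"),
   ("Vegetables", "Vegetable"),
   ("vegetables", "Vegetable"),
   ("Cheese", "Dairy"),
   ("Dairy desserts", "Dairy"),
   ("Ice cream", "Dairy"),
   ("Milk and yogurt", "Dairy"),
   ("Appetizers", "Snack"),
   ("Salty and fatty products", "Snack"),
   ("Biscuits and cakes", "Snack"),
   ("Chocolate products", "Snack"),
   ("Sweets", "Snack"),
   ("pastries", "Snack")]

def rename_group_alt (str_group2 : Option String) : Option String :=
  if str_group2 = none ∨ str_group2 = some "unknown" ∨ str_group2 = some "" then
    none
  else
    match str_group2 with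
    | none => none          -- unreachable: the guard already returned
    | some x => invTable.get? x   -- _INV.get(str_group2)

-- ===== PRECONDITION & SPEC =====
def Spec_rename_group (str_group2 : Option String) (out : Option String) : Prop := out = rename_group_alt str_group2
instance (str_group2 : Option String) (out : Option String) : Decidable (Spec_rename_group str_group2 out) := by unfold Spec_rename_group; infer_instance

-- ===== CLAIM (what is proved, stated in full; the proofs are below) =====
def Claim_equal_rename_group : Prop := ∀ (str_group2 : Option String), Dom_rename_group str_group2 → Spec_rename_group str_group2 (rename_group str_group2)

-- ===== LEMMAS AND PROOFS =====

-- when the argument is some string that is none of the 40 subgroup names, both ports return none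
theorem rename_group_none_case (s : String)
    (h : ∀ n ∈ (convertGroup2.flatMap Prod.snd).filterMap id, s ≠ n) :
    rename_group (some s) = rename_group_alt (some s) := by
  have hA : rename_group (some s) = none := by
    unfold rename_group
    have : convertGroup2.filter (fun kv => (some s) ∈ kv.2) = [] := by
      rw [List.filter_eq_nil_iff]
      intro kv hkv
      simp only [decide_eq_true_eq]
      intro hin
      exact h s (by
        simp only [List.mem_filterMap, List.mem_flatMap]
        exact ⟨some s, ⟨kv, hkv, hin⟩, rfl⟩) rfl
    simp [this]
  have hB : rename_group_alt (some s) = none := by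
    unfold rename_group_alt
    have hu : s ≠ "unknown" := h "unknown" (by decide)
    have he : s ≠ "" := h "" (by decide)
    have hkey : invTable.get? s = none := by
      rw [PySem.Dict.get?_eq_none_iff_not_mem_keys]
      simp only [invTable, PySem.Dict.keys_mk, List.map_cons, List.map_nil,
        List.mem_cons, List.not_mem_nil, or_false]
      intro hmem
      rcases hmem with rfl|rfl|rfl|rfl|rfl|rfl|rfl|rfl|rfl|rfl|rfl|rfl|rfl|rfl|rfl|rfl|rfl|rfl|rfl|rfl|rfl|rfl|rfl|rfl|rfl|rfl|rfl|rfl|rfl|rfl|rfl|rfl|rfl|rfl|rfl|rfl|rfl|rfl <;>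
        exact h _ (by decide) rfl
    simp [hu, he, hkey]
  rw [hA, hB]

set_option maxRecDepth 100000 in
set_option maxHeartbeats 3200000 in
theorem rename_group_eq (str_group2 : Option String) :
    rename_group str_group2 = rename_group_alt str_group2 := by
  match str_group2 with
  | none => decide
  | some s =>
  by_cases h0 : s = "Alcoholic beverages"
  · subst h0; decide
  by_cases h1 : s = "Artificially sweetened beverages"
  · subst h1; decide
  by_cases h2 : s = "Fruit juices"
  · subst h2; decide
  by_cases h3 : s = "Fruit nectars"
  · subst h3; decide
  by_cases h4 : s = "Non-sugared beverages"
  · subst h4; decide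
  by_cases h5 : s = "Sweetened beverages"
  · subst h5; decide
  by_cases h6 : s = "Bread"
  · subst h6; decide
  by_cases h7 : s = "Breakfast cereals"
  · subst h7; decide
  by_cases h8 : s = "Cereals"
  · subst h8; decide
  by_cases h9 : s = "Legumes"
  · subst h9; decide
  by_cases h10 : s = "Patatoes"
  · subst h10; decide
  by_cases h11 : s = "One-dish meals"
  · subst h11; decide
  by_cases h12 : s = "Pizza pies and quiche"
  · subst h12; decide
  by_cases h13 : s = "Sandwich"
  · subst h13; decide
  by_cases h14 : s = "Dressings and sauces"
  · subst h14; decide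
  by_cases h15 : s = "Fats"
  · subst h15; decide
  by_cases h16 : s = "Tripe dishes"
  · subst h16; decide
  by_cases h17 : s = "Eggs"
  · subst h17; decide
  by_cases h18 : s = "Fish and seafood"
  · subst h18; decide
  by_cases h19 : s = "Meat"
  · subst h19; decide
  by_cases h20 : s = "Processed meat"
  · subst h20; decide
  by_cases h21 : s = "Nuts"
  · subst h21; decide
  by_cases h22 : s = "Fruits"
  · subst h22; decide
  by_cases h23 : s = "fruits"
  · subst h23; decide
  by_cases h24 : s = "Dried fruits"
  · subst h24; decide
  by_cases h25 : s = "Soups"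
  · subst h25; decide
  by_cases h26 : s = "Vegetables"
  · subst h26; decide
  by_cases h27 : s = "vegetables"
  · subst h27; decide
  by_cases h28 : s = "Cheese"
  · subst h28; decide
  by_cases h29 : s = "Dairy desserts"
  · subst h29; decide
  by_cases h30 : s = "Ice cream"
  · subst h30; decide
  by_cases h31 : s = "Milk and yogurt"
  · subst h31; decide
  by_cases h32 : s = "Appetizers"
  · subst h32; decide
  by_cases h33 : s = "Salty and fatty products"
  · subst h33; decide
  by_cases h34 : s = "Biscuits and cakes"
  · subst h34; decide
  by_cases h35 : s = "Chocolate products"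
  · subst h35; decide
  by_cases h36 : s = "Sweets"
  · subst h36; decide
  by_cases h37 : s = "pastries"
  · subst h37; decide
  by_cases h38 : s = "unknown"
  · subst h38; decide
  by_cases h39 : s = ""
  · subst h39; decide
  apply rename_group_none_case
  intro n hn
  rw [show (convertGroup2.flatMap Prod.snd).filterMap id = ["Alcoholic beverages", "Artificially sweetened beverages", "Fruit juices", "Fruit nectars", "Non-sugared beverages", "Sweetened beverages", "Bread", "Breakfast cereals", "Cereals", "Legumes", "Patatoes", "One-dish meals", "Pizza pies and quiche", "Sandwich", "Dressings and sauces", "Fats", "Tripe dishes", "Eggs", "Fish and seafood", "Meat", "Processed meat", "Nuts", "Fruits", "fruits", "Dried fruits", "Soups", "Vegetables", "vegetables", "Cheese", "Dairy desserts", "Ice cream", "Milk and yogurt", "Appetizers", "Salty and fatty products", "Biscuits and cakes", "Chocolate products", "Sweets", "pastries", "unknown", ""] from by decide] at hn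
  simp only [List.mem_cons, List.not_mem_nil, or_false] at hn
  rcases hn with rfl|rfl|rfl|rfl|rfl|rfl|rfl|rfl|rfl|rfl|rfl|rfl|rfl|rfl|rfl|rfl|rfl|rfl|rfl|rfl|rfl|rfl|rfl|rfl|rfl|rfl|rfl|rfl|rfl|rfl|rfl|rfl|rfl|rfl|rfl|rfl|rfl|rfl|rfl|rfl <;> assumption

-- ===== VERDICT (by name: the statement is the Claim_ definition above) =====
theorem rename_group_spec : Claim_equal_rename_group := by
  intro s _
  unfold Spec_rename_group
  exact rename_group_eq s
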